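-- pv_equiv track=rewrite | github.com/adenger/subpred4 | subpred/graph.py | sort_by_sample_count
-- ===== SOURCE A (Python) =====
-- def sort_by_sample_count(annotations: list, annotation_to_samples: dict):
--     # sort list of annotations by number of mapped samples
--     nodes_to_count = {
--         annotation: len(samples)
--         for annotation, samples in annotation_to_samples.items()
--         if annotation in annotations
--     }
--     nodes_to_count = sorted(nodes_to_count.items(), key=lambda x: x[1], reverse=True)
--     annotations = [y[0] for y in nodes_to_count]
--     return annotations
-- ===== SOURCE B (Python) =====
-- def sort_by_sample_count(annotations: list, annotation_to_samples: dict):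
--     # sample counts of the relevant annotations
--     counts = [len(samples) for annotation, samples in annotation_to_samples.items()
--               if annotation in annotations]
--     if not counts:
--         return []
--     # sweep the possible counts downwards, collecting annotations with that exact count
--     result = []
--     for count in range(max(counts), -1, -1):
--         for annotation, samples in annotation_to_samples.items():
--             if annotation in annotations and len(samples) == count:
--                 result.append(annotation)
--     return result
-- ===== Notes on version B (the rewrite author's own statement) =====
-- stated objective: alternative
-- what changed: Replaces building a dict of counts and calling sorted() by a sort-free downward sweep: compute the maximum sample count once, then walk count values from max down to 0 and append the annotations whose sample count equals the current value (a counting-sort-style selection).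
import Mathlib
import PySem

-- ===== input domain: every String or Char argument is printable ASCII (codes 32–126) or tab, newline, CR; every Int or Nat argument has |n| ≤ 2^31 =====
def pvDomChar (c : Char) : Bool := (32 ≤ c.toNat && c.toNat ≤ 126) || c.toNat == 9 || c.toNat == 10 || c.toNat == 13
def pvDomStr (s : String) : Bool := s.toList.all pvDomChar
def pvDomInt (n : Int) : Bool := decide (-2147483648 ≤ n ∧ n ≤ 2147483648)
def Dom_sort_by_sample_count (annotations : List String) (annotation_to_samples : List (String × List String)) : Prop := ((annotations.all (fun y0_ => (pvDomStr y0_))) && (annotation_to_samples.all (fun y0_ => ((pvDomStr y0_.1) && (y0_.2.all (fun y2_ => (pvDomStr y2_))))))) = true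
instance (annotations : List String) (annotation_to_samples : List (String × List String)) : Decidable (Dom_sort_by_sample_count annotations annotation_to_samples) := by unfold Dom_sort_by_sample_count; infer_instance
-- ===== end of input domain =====

-- B replaces A's dict-of-counts + sorted() by a sort-free downward sweep: it computes the maximum
-- sample count once and walks the count values from max down to 0, collecting the annotations whose
-- count equals the current value (alternative decomposition, a counting-sort-style selection).

-- ===== PORT A =====
def sort_by_sample_count (annotations : List String) (annotation_to_samples : List (String × List String)) : List String :=
  let nodes_to_count : PySem.Dict String Int :=
    annotation_to_samples.foldl
      (fun d p => if annotations.contains p.1 then d.insert p.1 (p.2.length : Int) else d)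
      PySem.Dict.empty
  let nodes_to_count_sorted := PySem.List.sorted nodes_to_count.items (fun x => x.2) true
  nodes_to_count_sorted.map (fun y => y.1)

-- ===== PORT B =====
def sort_by_sample_count_alt (annotations : List String) (annotation_to_samples : List (String × List String)) : List String :=
  -- counts = [len(samples) for annotation, samples in annotation_to_samples.items() if annotation in annotations]
  let counts : List Int :=
    (annotation_to_samples.filter (fun p => annotations.contains p.1)).map
      (fun p => (p.2.length : Int))
  match counts with
  | [] => []           -- if not counts: return []
  | c0 :: rest =>
    -- max(counts) of a nonempty list is the running-max loop (PySem.List.max?_id_cons)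
    let m : Int := rest.foldl max c0
    -- for count in range(max(counts), -1, -1): for annotation, samples in items(): if …: result.append(annotation)
    (PySem.List.pyRange m (-1) (-1)).foldl
      (fun result count =>
        annotation_to_samples.foldl
          (fun result p =>
            if annotations.contains p.1 && ((p.2.length : Int) == count)
            then result ++ [p.1] else result)
          result)
      []

-- ===== PRECONDITION & SPEC =====
-- Pre_ requires distinct keys: the association list stands for the Python dict parameter
-- annotation_to_samples, and a Python dict cannot hold duplicate keys.
def Pre_sort_by_sample_count (annotations : List String) (annotation_to_samples : List (String × List String)) : Prop :=
  (annotation_to_samples.map (fun p => p.1)).Nodup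
instance (annotations : List String) (annotation_to_samples : List (String × List String)) : Decidable (Pre_sort_by_sample_count annotations annotation_to_samples) := by unfold Pre_sort_by_sample_count; infer_instance

def pvWitness_sort_by_sample_count : List String × (List (String × List String)) :=
  (["a", "b"], [("a", ["s1", "s2"]), ("b", ["s1"]), ("c", ["x"])])

def Spec_sort_by_sample_count (annotations : List String) (annotation_to_samples : List (String × List String)) (out : List String) : Prop := out = sort_by_sample_count_alt annotations annotation_to_samples
instance (annotations : List String) (annotation_to_samples : List (String × List String)) (out : List String) : Decidable (Spec_sort_by_sample_count annotations annotation_to_samples out) := by unfold Spec_sort_by_sample_count; infer_instance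

-- ===== CLAIM (what is proved, stated in full; the proofs are below) =====
def Claim_equal_sort_by_sample_count : Prop := ∀ (annotations : List String) (annotation_to_samples : List (String × List String)), Dom_sort_by_sample_count annotations annotation_to_samples → Pre_sort_by_sample_count annotations annotation_to_samples → Spec_sort_by_sample_count annotations annotation_to_samples (sort_by_sample_count annotations annotation_to_samples)

-- ===== LEMMAS AND PROOFS =====

-- a foldl whose body is guarded by `if c x` is the foldl over the filtered list
theorem foldl_if_filter {α β : Type} (c : α → Bool) (f : β → α → β) (l : List α) (init : β) :
    l.foldl (fun d x => if c x then f d x else d) init = (l.filter c).foldl f init := by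
  induction l generalizing init with
  | nil => rfl
  | cons y ys ih =>
    by_cases h : c y = true
    · simp [List.foldl_cons, h, ih]
    · simp [List.foldl_cons, h, ih]

-- insertBy passes over a prefix none of whose elements trigger `before`
theorem insertBy_append_not_before {α : Type} (before : α → α → Bool) (x : α) (P Q : List α)
    (hP : ∀ y ∈ P, before x y = false) :
    PySem.List.insertBy before x (P ++ Q) = P ++ PySem.List.insertBy before x Q := by
  induction P with
  | nil => rfl
  | cons y ys ih =>
    have hy : before x y = false := hP y (by simp)
    simp only [List.cons_append, PySem.List.insertBy, hy]
    simp only [Bool.false_eq_true, if_false]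
    exact congrArg (y :: ·) (ih (fun z hz => hP z (by simp [hz])))

-- insertBy puts x in front when every element triggers `before`
theorem insertBy_all_before {α : Type} (before : α → α → Bool) (x : α) (Q : List α)
    (hQ : ∀ y ∈ Q, before x y = true) :
    PySem.List.insertBy before x Q = x :: Q := by
  cases Q with
  | nil => rfl
  | cons y ys => simp [PySem.List.insertBy, hQ y (by simp)]

-- split a strictly descending list at a member
theorem split_desc_mem (L : List Int) (c : Int) (hL : L.Pairwise (fun a b => b < a)) (hc : c ∈ L) :
    ∃ P Q, L = P ++ c :: Q ∧ (∀ p ∈ P, c < p) ∧ (∀ q ∈ Q, q < c) := by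
  induction L with
  | nil => cases hc
  | cons y ys ih =>
    rcases List.pairwise_cons.mp hL with ⟨hy, hys⟩
    by_cases hyc : y = c
    · exact ⟨[], ys, by simp [hyc], by simp, fun q hq => hyc ▸ hy q hq⟩
    · have hc' : c ∈ ys := by
        rcases List.mem_cons.mp hc with h | h
        · exact absurd h.symm hyc
        · exact h
      rcases ih hys hc' with ⟨P, Q, hPQ, hP, hQ⟩
      exact ⟨y :: P, Q, by simp [hPQ], by
        intro p hp
        rcases List.mem_cons.mp hp with rfl | hp
        · exact hy c hc'
        · exact hP p hp, hQ⟩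

-- split a strictly descending list around a non-member c
theorem split_desc_not_mem (L : List Int) (c : Int) (hL : L.Pairwise (fun a b => b < a)) (hc : c ∉ L) :
    ∃ P Q, L = P ++ Q ∧ (∀ p ∈ P, c < p) ∧ (∀ q ∈ Q, q < c) := by
  induction L with
  | nil => exact ⟨[], [], rfl, by simp, by simp⟩
  | cons y ys ih =>
    rcases List.pairwise_cons.mp hL with ⟨hy, hys⟩
    by_cases hyc : y < c
    · refine ⟨[], y :: ys, rfl, by simp, ?_⟩
      intro q hq
      rcases List.mem_cons.mp hq with rfl | hq
      · exact hyc
      · exact lt_trans (hy q hq) hyc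
    · have hcy : c < y := lt_of_le_of_ne (not_lt.mp hyc) (fun h => hc (h ▸ List.mem_cons_self))
      rcases ih hys (fun h => hc (List.mem_cons_of_mem _ h)) with ⟨P, Q, hPQ, hP, hQ⟩
      refine ⟨y :: P, Q, by simp [hPQ], ?_, hQ⟩
      intro p hp
      rcases List.mem_cons.mp hp with rfl | hp
      · exact hcy
      · exact hP p hp

-- KEY LEMMA (A's side): a stable descending sort equals the concatenation, over the distinct key
-- values in descending order, of the groups of elements carrying that key value (in original order).
theorem sorted_rev_eq_grouped {α : Type} (key : α → Int) (xs : List α) :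
    PySem.List.sorted xs key true =
      (PySem.List.sorted (PySem.Set.ofList (xs.map key)) (fun c => c) true).flatMap
        (fun c => xs.filter (fun x => key x == c)) := by
  induction xs using List.reverseRecOn with
  | nil => rfl
  | append_singleton xs x ih =>
    set c : Int := key x with hc
    set K : PySem.Set Int := PySem.Set.ofList (xs.map key) with hK
    set L : List Int := PySem.List.sorted K (fun c => c) true with hL
    set B : α → α → Bool := fun a b => decide (key b < key a) with hB
    have hLHS : PySem.List.sorted (xs ++ [x]) key true
        = PySem.List.insertBy B x (PySem.List.sorted xs key true) := by
      rw [PySem.List.sorted_rev_eq_foldl_insertBy, List.foldl_append,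
        ← PySem.List.sorted_rev_eq_foldl_insertBy]
      simp [hB]
    have hLnodup : L.Nodup := ((PySem.List.sorted_perm K (fun c => c) true).nodup_iff).mpr
      (PySem.Set.nodup_ofList _)
    have hdesc : L.Pairwise (fun a b => b < a) := by
      have h1 : L.Pairwise (fun a b : Int => b ≤ a) := by
        simpa using PySem.List.sorted_pairwise_rev K (fun c : Int => c)
      exact (h1.and hLnodup).imp (fun {a b} h => lt_of_le_of_ne h.1 (fun hba => h.2 hba.symm))
    have hmapK : (xs ++ [x]).map key = xs.map key ++ [c] := by simp [hc]
    have hkeymem : ∀ (M : List Int) (y : α),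
        y ∈ M.flatMap (fun c' => xs.filter (fun z => key z == c')) → key y ∈ M := by
      intro M y hy
      rcases List.mem_flatMap.mp hy with ⟨c', hc', hy'⟩
      have := (List.mem_filter.mp hy').2
      simpa [eq_of_beq this] using hc'
    by_cases hmem : c ∈ K
    · have hcL : c ∈ L := (PySem.List.mem_sorted _ _ _ _).mpr hmem
      obtain ⟨P, Q, hPQ, hP, hQ⟩ := split_desc_mem L c hdesc hcL
      have hRkeys : PySem.Set.ofList ((xs ++ [x]).map key) = K := by
        rw [hmapK, PySem.Set.ofList_append_singleton, ← hK, PySem.Set.add_of_mem hmem]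
      rw [hLHS, ih, hRkeys, ← hL, hPQ]
      have hfilt : ∀ c' : Int, (xs ++ [x]).filter (fun z => key z == c')
          = xs.filter (fun z => key z == c') ++ (if key x = c' then [x] else []) := by
        intro c'; simp [List.filter_append, List.filter_singleton]
      simp only [List.flatMap_cons, List.flatMap_append, hfilt]
      have hPgroups : P.flatMap (fun c' => xs.filter (fun z => key z == c')
          ++ (if key x = c' then [x] else []))
          = P.flatMap (fun c' => xs.filter (fun z => key z == c')) := by
        refine List.flatMap_congr (fun c' hc' => ?_)
        have hne : ¬ (key x = c') := by have := hP c' hc'; omega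
        simp [hne]
      have hQgroups : Q.flatMap (fun c' => xs.filter (fun z => key z == c')
          ++ (if key x = c' then [x] else []))
          = Q.flatMap (fun c' => xs.filter (fun z => key z == c')) := by
        refine List.flatMap_congr (fun c' hc' => ?_)
        have hne : ¬ (key x = c') := by have := hQ c' hc'; omega
        simp [hne]
      rw [hPgroups, hQgroups]
      have hpre : ∀ y ∈ P.flatMap (fun c' => xs.filter (fun z => key z == c'))
          ++ xs.filter (fun z => key z == c), B x y = false := by
        intro y hy
        rcases List.mem_append.mp hy with hy | hy
        · have := hP _ (hkeymem P y hy); simp [hB, hc]; omega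
        · have := eq_of_beq (List.mem_filter.mp hy).2
          simp [hB, hc, this]
      have hsuf : ∀ y ∈ Q.flatMap (fun c' => xs.filter (fun z => key z == c')), B x y = true := by
        intro y hy
        have := hQ _ (hkeymem Q y hy); simp [hB, hc]; omega
      rw [← List.append_assoc, insertBy_append_not_before B x _ _ hpre,
        insertBy_all_before B x _ hsuf]
      simp [hc]
    · have hcL : c ∉ L := fun h => hmem ((PySem.List.mem_sorted _ _ _ _).mp h)
      obtain ⟨P, Q, hPQ, hP, hQ⟩ := split_desc_not_mem L c hdesc hcL
      have hempty : xs.filter (fun z => key z == c) = [] := by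
        refine List.filter_eq_nil_iff.mpr (fun z hz hzc => ?_)
        exact hmem ((PySem.Set.mem_ofList _ _).mpr (List.mem_map.mpr ⟨z, hz, eq_of_beq hzc⟩))
      have hRkeys : PySem.Set.ofList ((xs ++ [x]).map key) = K ++ [c] := by
        rw [hmapK, PySem.Set.ofList_append_singleton, ← hK, PySem.Set.add_of_not_mem hmem]
      have hsortednew : PySem.List.sorted (K ++ [c]) (fun c : Int => c) true = P ++ c :: Q := by
        rw [PySem.List.sorted_rev_eq_foldl_insertBy, List.foldl_append,
          ← PySem.List.sorted_rev_eq_foldl_insertBy, ← hL, hPQ]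
        simp only [List.foldl_cons, List.foldl_nil]
        rw [insertBy_append_not_before _ c P Q (fun y hy => by have := hP y hy; simp; omega)]
        rw [insertBy_all_before _ c Q (fun y hy => by have := hQ y hy; simp; omega)]
      rw [hLHS, ih, hRkeys, hsortednew, hPQ]
      have hfilt : ∀ c' : Int, (xs ++ [x]).filter (fun z => key z == c')
          = xs.filter (fun z => key z == c') ++ (if key x = c' then [x] else []) := by
        intro c'; simp [List.filter_append, List.filter_singleton]
      simp only [List.flatMap_cons, List.flatMap_append, hfilt]
      have hPgroups : P.flatMap (fun c' => xs.filter (fun z => key z == c')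
          ++ (if key x = c' then [x] else []))
          = P.flatMap (fun c' => xs.filter (fun z => key z == c')) := by
        refine List.flatMap_congr (fun c' hc' => ?_)
        have hne : ¬ (key x = c') := by have := hP c' hc'; omega
        simp [hne]
      have hQgroups : Q.flatMap (fun c' => xs.filter (fun z => key z == c')
          ++ (if key x = c' then [x] else []))
          = Q.flatMap (fun c' => xs.filter (fun z => key z == c')) := by
        refine List.flatMap_congr (fun c' hc' => ?_)
        have hne : ¬ (key x = c') := by have := hQ c' hc'; omega
        simp [hne]
      rw [hPgroups, hQgroups]
      have hpre : ∀ y ∈ P.flatMap (fun c' => xs.filter (fun z => key z == c')), B x y = false := by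
        intro y hy
        have := hP _ (hkeymem P y hy); simp [hB, hc]; omega
      have hsuf : ∀ y ∈ Q.flatMap (fun c' => xs.filter (fun z => key z == c')), B x y = true := by
        intro y hy
        have := hQ _ (hkeymem Q y hy); simp [hB, hc]; omega
      rw [insertBy_append_not_before B x _ _ hpre, insertBy_all_before B x _ hsuf]
      simp [hempty, hc]
      intro a ha hkey
      exact hmem ((PySem.Set.mem_ofList _ _).mpr (List.mem_map.mpr ⟨a, ha, by omega⟩))

-- B's side: counts whose group is empty contribute nothing to the flatMap
theorem flatMap_eq_flatMap_filter {α β : Type} (l : List α) (pred : α → Bool) (g : α → List β)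
    (h : ∀ c ∈ l, pred c = false → g c = []) :
    l.flatMap g = (l.filter pred).flatMap g := by
  induction l with
  | nil => rfl
  | cons y ys ih =>
    by_cases hy : pred y = true
    · simp [hy, ih (fun c hc => h c (List.mem_cons_of_mem _ hc))]
    · have hy' : pred y = false := by simpa using hy
      simp [hy', h y List.mem_cons_self hy',
        ih (fun c hc => h c (List.mem_cons_of_mem _ hc))]

-- two strictly descending integer lists with the same members are equal
theorem desc_ext (l1 l2 : List Int) (h1 : l1.Pairwise (fun a b => b < a))
    (h2 : l2.Pairwise (fun a b => b < a)) (hm : ∀ x, x ∈ l1 ↔ x ∈ l2) : l1 = l2 := by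
  induction l1 generalizing l2 with
  | nil =>
    cases l2 with
    | nil => rfl
    | cons y ys => exact absurd ((hm y).mpr List.mem_cons_self) (List.not_mem_nil)
  | cons x xs ih =>
    cases l2 with
    | nil => exact absurd ((hm x).mp List.mem_cons_self) (List.not_mem_nil)
    | cons y ys =>
      rcases List.pairwise_cons.mp h1 with ⟨hx, hxs⟩
      rcases List.pairwise_cons.mp h2 with ⟨hy, hys⟩
      have hxy : x = y := by
        rcases List.mem_cons.mp ((hm x).mp List.mem_cons_self) with h | h
        · exact h
        · rcases List.mem_cons.mp ((hm y).mpr List.mem_cons_self) with h' | h'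
          · exact h'.symm
          · have := hy x h; have := hx y h'; omega
      subst hxy
      refine congrArg (x :: ·) (ih ys hxs hys (fun z => ⟨?_, ?_⟩))
      · intro hz
        rcases List.mem_cons.mp ((hm z).mp (List.mem_cons_of_mem _ hz)) with h | h
        · exact absurd h (by have := hx z hz; omega)
        · exact h
      · intro hz
        rcases List.mem_cons.mp ((hm z).mpr (List.mem_cons_of_mem _ hz)) with h | h
        · exact absurd h (by have := hy z hz; omega)
        · exact h

theorem sort_by_sample_count_spec : Claim_equal_sort_by_sample_count := by
  intro annotations ats _hdom hpre
  unfold Spec_sort_by_sample_count sort_by_sample_count sort_by_sample_count_alt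
  dsimp only
  rw [foldl_if_filter]
  set filtered := ats.filter (fun p => annotations.contains p.1) with hf
  set key : String × List String → Int := fun p => (p.2.length : Int) with hkey
  -- A side: the comprehension's items are the filtered pairs with their counts
  have hnodup : (filtered.map (fun p => p.1)).Nodup :=
    hpre.sublist (List.Sublist.map (fun p => p.1) (List.filter_sublist (l := ats)))
  have hitems : (filtered.foldl (fun d p => d.insert p.1 (key p)) PySem.Dict.empty).items
      = filtered.map (fun p => (p.1, key p)) := by
    rw [PySem.Dict.items_foldl_insert_fresh filtered (fun p => p.1) key
      PySem.Dict.empty (fun a _ => PySem.Dict.contains_empty _) hnodup]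
    rfl
  rw [hitems, sorted_rev_eq_grouped (fun q : String × Int => q.2)]
  -- the group of pairs with count c, projected to names
  have hgroup : ∀ c : Int, ((filtered.map (fun p => (p.1, key p))).filter
        (fun q => q.2 == c)).map (fun q : String × Int => q.1)
      = (filtered.filter (fun p => key p == c)).map (fun p => p.1) := by
    intro c; simp [List.filter_map, List.map_map, Function.comp_def]
  -- B side
  cases hcase : filtered.map key with
  | nil =>
    have hfe : filtered = [] := List.map_eq_nil_iff.mp hcase
    simp [hfe]
  | cons c0 rest =>
    dsimp only
    set m : Int := rest.foldl max c0 with hm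
    -- inner loop: collect the names of the filtered pairs whose count is `count`
    have hinner : ∀ (count : Int) (res : List String),
        ats.foldl (fun res p =>
            if annotations.contains p.1 && (key p == count) then res ++ [p.1] else res) res
          = res ++ (filtered.filter (fun p => key p == count)).map (fun p => p.1) := by
      intro count res
      rw [PySem.List.foldl_append_if (fun p => annotations.contains p.1 && (key p == count))
        (fun p => p.1) ats res]
      congr 1
      rw [hf, List.filter_filter]
      congr 1
      exact List.filter_congr (fun a _ => Bool.and_comm _ _)
    have houter : (PySem.List.pyRange m (-1) (-1)).foldl
        (fun result count =>
          ats.foldl (fun res p =>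
            if annotations.contains p.1 && (key p == count) then res ++ [p.1] else res) result)
        []
        = (PySem.List.pyRange m (-1) (-1)).flatMap
            (fun c => (filtered.filter (fun p => key p == c)).map (fun p => p.1)) := by
      simp only [hinner]
      rw [PySem.List.foldl_append_eq_flatMap]
      simp
    rw [houter]
    -- drop counts with empty groups on the B side
    set pred : Int → Bool := fun c => (filtered.map key).contains c with hpredd
    have hempty : ∀ c : Int, pred c = false →
        (filtered.filter (fun p => key p == c)).map (fun p => p.1) = [] := by
      intro c hc
      have hfil : filtered.filter (fun p => key p == c) = [] := by
        refine List.filter_eq_nil_iff.mpr (fun p hp hpc => ?_)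
        have hmem : c ∈ filtered.map key := List.mem_map.mpr ⟨p, hp, eq_of_beq hpc⟩
        have htrue : pred c = true := by rw [hpredd]; simpa using hmem
        simp [htrue] at hc
      simp [hfil]
    rw [flatMap_eq_flatMap_filter _ pred _ (fun c _ hc => hempty c hc)]
    -- the surviving counts, in descending order, are exactly A's sorted distinct counts
    have hR : (PySem.List.pyRange m (-1) (-1)).filter pred
        = PySem.List.sorted (PySem.Set.ofList (filtered.map key)) (fun c : Int => c) true := by
      -- both strictly descending with the same members
      set L := PySem.List.sorted (PySem.Set.ofList (filtered.map key)) (fun c : Int => c) true with hL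
      have hLnodup : L.Nodup := ((PySem.List.sorted_perm _ (fun c : Int => c) true).nodup_iff).mpr
        (PySem.Set.nodup_ofList _)
      have hLdesc : L.Pairwise (fun a b => b < a) := by
        have h1 : L.Pairwise (fun a b : Int => b ≤ a) := by
          simpa using PySem.List.sorted_pairwise_rev (PySem.Set.ofList (filtered.map key)) (fun c : Int => c)
        exact (h1.and hLnodup).imp (fun {a b} h => lt_of_le_of_ne h.1 (fun hba => h.2 hba.symm))
      have hRdesc : (PySem.List.pyRange m (-1) (-1)).Pairwise (fun a b => b < a) := by
        rw [PySem.List.pyRange_neg_one_eq_reverse, List.pairwise_reverse]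
        exact PySem.List.pairwise_lt_pyRange_one _ _
      -- bounds on the members of counts
      have hbound : ∀ c ∈ filtered.map key, 0 ≤ c ∧ c ≤ m := by
        intro c hc
        have hle : c ≤ m := by
          rw [hcase] at hc
          rcases List.mem_cons.mp hc with rfl | hc
          · exact (PySem.List.le_foldl_max rest c).1
          · exact (PySem.List.le_foldl_max rest c0).2 c hc
        have h0 : 0 ≤ c := by
          rcases List.mem_map.mp hc with ⟨p, _, rfl⟩
          exact Int.natCast_nonneg _
        exact ⟨h0, hle⟩
      refine desc_ext _ _ (hRdesc.filter pred) hLdesc (fun x => ?_)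
      rw [List.mem_filter, PySem.List.mem_pyRange_neg_one, hL, PySem.List.mem_sorted,
        PySem.Set.mem_ofList, hpredd]
      constructor
      · rintro ⟨_, hx⟩
        simpa using hx
      · intro hx
        have hb := hbound x hx
        exact ⟨by omega, by simpa using hx⟩
    rw [hR, List.map_flatMap]
    simp only [List.map_map, Function.comp_def]
    exact List.flatMap_congr (fun c _ => hgroup c)
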